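-- pv_equiv track=rewrite | github.com/computer-engineering-23/CDIO_project_-62410 | LogViewer.py | extendReport
-- ===== SOURCE A (Python) =====
-- def extendReport(report:list[tuple[str,list[str]]], lines:tuple[str,list[str]]) -> list[tuple[str,list[str]]]:
--   newFile, newLines = lines
--   if newFile not in [f[0] for f in report]:
--     report.append((newFile, newLines))
--   else:
--     for i, (file, existingLines) in enumerate(report):
--       if file == newFile:
--         report[i] = (file, existingLines + newLines)
--         break
--   return report
-- ===== SOURCE B (Python) =====
-- def extendReport(report, lines):
--     # Recursive, non-mutating merge: return value equals A's; unlike A it does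
--     # not mutate the input list in place.
--     newFile, newLines = lines
--     if not report:
--         return [(newFile, newLines)]
--     f, e = report[0]
--     if f == newFile:
--         return [(f, e + newLines)] + report[1:]
--     return [(f, e)] + extendReport(report[1:], lines)
-- ===== Notes on version B (the rewrite author's own statement) =====
-- stated objective: simpler
-- what changed: Replaces A's membership pre-scan over a projected list plus a separate enumerate-and-set loop with one structural recursion that merges at the first matching filename or appends at the end; B builds a fresh list instead of mutating report in place (return values agree).
import Mathlib
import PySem

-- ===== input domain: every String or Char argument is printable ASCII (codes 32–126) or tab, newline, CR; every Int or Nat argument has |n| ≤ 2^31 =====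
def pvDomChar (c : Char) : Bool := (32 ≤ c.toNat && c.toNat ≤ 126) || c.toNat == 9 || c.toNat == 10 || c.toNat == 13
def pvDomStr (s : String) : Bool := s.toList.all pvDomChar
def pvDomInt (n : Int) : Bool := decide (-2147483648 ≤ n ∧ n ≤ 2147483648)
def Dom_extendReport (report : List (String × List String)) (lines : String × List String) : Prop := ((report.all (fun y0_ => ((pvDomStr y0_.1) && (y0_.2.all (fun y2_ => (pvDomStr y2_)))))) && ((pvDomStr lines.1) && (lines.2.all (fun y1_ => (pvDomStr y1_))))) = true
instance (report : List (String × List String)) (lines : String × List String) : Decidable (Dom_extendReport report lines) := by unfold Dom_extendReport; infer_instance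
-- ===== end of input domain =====

-- ===== PORT A =====
-- header: B merges in one structural recursion instead of A's membership pre-scan +
-- enumerate/set loop; A mutates `report` in place, B builds a fresh list — the
-- equivalence proved here is about the RETURN value only.
-- the `for i, (file, existingLines) in enumerate(report): … break` loop of A:
def extendReport_loop (full : List (String × List String)) (nf : String) (nl : List String) : Nat → List (String × List String) → List (String × List String)
  | _, [] => full
  | i, (f, e) :: rest =>
    if f == nf then full.set i (f, e ++ nl)
    else extendReport_loop full nf nl (i + 1) rest

def extendReport (report : List (String × List String)) (lines : String × List String) : List (String × List String) :=
  let newFile := lines.1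
  let newLines := lines.2
  if ¬ (report.map (fun f => f.1)).contains newFile then
    report ++ [(newFile, newLines)]
  else
    extendReport_loop report newFile newLines 0 report

-- ===== PORT B =====
def extendReport_alt (report : List (String × List String)) (lines : String × List String) : List (String × List String) :=
  match report with
  | [] => [(lines.1, lines.2)]
  | (f, e) :: rest =>
    if f == lines.1 then [(f, e ++ lines.2)] ++ rest
    else [(f, e)] ++ extendReport_alt rest lines

-- ===== PRECONDITION & SPEC =====
def Spec_extendReport (report : List (String × List String)) (lines : String × List String) (out : List (String × List String)) : Prop := out = extendReport_alt report lines
instance (report : List (String × List String)) (lines : String × List String) (out : List (String × List String)) : Decidable (Spec_extendReport report lines out) := by unfold Spec_extendReport; infer_instance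

-- ===== CLAIM (what is proved, stated in full; the proofs are below) =====
def Claim_equal_extendReport : Prop := ∀ (report : List (String × List String)) (lines : String × List String), Dom_extendReport report lines → Spec_extendReport report lines (extendReport report lines)

-- ===== LEMMAS AND PROOFS =====
theorem extendReport_alt_no_match (nf : String) (nl : List String) :
    ∀ (rest : List (String × List String)), (∀ p ∈ rest, p.1 ≠ nf) →
      extendReport_alt rest (nf, nl) = rest ++ [(nf, nl)] := by
  intro rest
  induction rest with
  | nil => intro _; rfl
  | cons hd tl ih =>
    intro h
    obtain ⟨f, e⟩ := hd
    have hf : f ≠ nf := h (f, e) (List.mem_cons_self ..)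
    simp [extendReport_alt, hf, ih (fun p hp => h p (List.mem_cons_of_mem _ hp))]

theorem extendReport_loop_eq_alt (nf : String) (nl : List String) :
    ∀ (rest pre : List (String × List String)),
      (∃ p ∈ rest, p.1 = nf) →
      extendReport_loop (pre ++ rest) nf nl pre.length rest =
        pre ++ extendReport_alt rest (nf, nl) := by
  intro rest
  induction rest with
  | nil => intro pre h; simp at h
  | cons hd tl ih =>
    intro pre h
    obtain ⟨f, e⟩ := hd
    by_cases hf : f = nf
    · subst hf
      simp [extendReport_loop, extendReport_alt, List.set_append_right]
    · have h' : ∃ p ∈ tl, p.1 = nf := by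
        rcases h with ⟨p, hp, hpe⟩
        rcases List.mem_cons.mp hp with h1 | h1
        · exact absurd (by rw [h1] at hpe; exact hpe) hf
        · exact ⟨p, h1, hpe⟩
      have := ih (pre ++ [(f, e)]) h'
      simp only [List.append_assoc, List.singleton_append, List.length_append,
        List.length_singleton] at this
      simp [extendReport_loop, hf, extendReport_alt, this]

-- ===== VERDICT (by name: the statement is the Claim_ definition above) =====
theorem extendReport_spec : Claim_equal_extendReport := by
  intro report lines _
  unfold Spec_extendReport extendReport
  obtain ⟨nf, nl⟩ := lines
  by_cases hmem : (report.map (fun f => f.1)).contains nf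
  · rw [if_neg (by simpa using hmem)]
    have hex : ∃ p ∈ report, p.1 = nf := by
      simp only [List.contains_eq_mem, List.mem_map, decide_eq_true_eq] at hmem
      rcases hmem with ⟨p, hp, he⟩
      exact ⟨p, hp, he⟩
    simpa using extendReport_loop_eq_alt nf nl report [] hex
  · rw [if_pos (by simpa using hmem)]
    have hno : ∀ p ∈ report, p.1 ≠ nf := by
      intro p hp he
      exact hmem (by
        simp only [List.contains_eq_mem, List.mem_map, decide_eq_true_eq]
        exact ⟨p, hp, he⟩)
    exact (extendReport_alt_no_match nf nl report hno).symm
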